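-- pv_equiv track=rewrite | github.com/Radware/mssp_to_cc_migration_tool | mssp_migrate_to_cc.py | select_new_role
-- ===== SOURCE A (Python) =====
-- def select_new_role(current_roles):
--     """
--     Selects a new role for the user based on the corrected hierarchy:
--     User-Admin (userAdmin) > User-Basic (basicUser) > User-Monitor/User-Viewer (dashboardUser/userViewer)
--
--     Parameters:
--     - current_roles: List of roles the user currently has.
--
--     Returns:
--     - str: The new role for the user.
--     """
--     # Updated role hierarchy and mapping with corrected order
--     new_role_mapping = {
--         'userAdmin': 'MSSP_PORTAL_ADMIN',
--         'basicUser': 'MSSP_PORTAL_USER',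
--         'dashboardUser': 'MSSP_PORTAL_VIEWER',  # dashboardUser and userViewer have the same priority, but come after basicUser
--         'userViewer': 'MSSP_PORTAL_VIEWER'
--     }
--
--     # Order of priority based on corrected hierarchy
--     role_priority = ['userAdmin', 'basicUser', 'dashboardUser', 'userViewer']
--
--     for role in role_priority:
--         if role in current_roles:
--             return new_role_mapping[role]
--
--     return None  # Return None if no roles match
-- ===== SOURCE B (Python) =====
-- def select_new_role(current_roles):
--     """One pass over current_roles, tracking the smallest-ranked known role."""
--     table = {
--         'userAdmin': (0, 'MSSP_PORTAL_ADMIN'),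
--         'basicUser': (1, 'MSSP_PORTAL_USER'),
--         'dashboardUser': (2, 'MSSP_PORTAL_VIEWER'),
--         'userViewer': (3, 'MSSP_PORTAL_VIEWER'),
--     }
--     best = None
--     for r in current_roles:
--         hit = table.get(r)
--         if hit is not None and (best is None or hit[0] < best[0]):
--             best = hit
--     return best[1] if best is not None else None
-- ===== Notes on version B (the rewrite author's own statement) =====
-- stated objective: alternative
-- what changed: B inverts the driving loop: instead of scanning the fixed priority list and testing membership in current_roles for each role, it makes a single pass over current_roles with a role->(rank,new_role) table, keeping the smallest-ranked hit.
import Mathlib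
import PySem

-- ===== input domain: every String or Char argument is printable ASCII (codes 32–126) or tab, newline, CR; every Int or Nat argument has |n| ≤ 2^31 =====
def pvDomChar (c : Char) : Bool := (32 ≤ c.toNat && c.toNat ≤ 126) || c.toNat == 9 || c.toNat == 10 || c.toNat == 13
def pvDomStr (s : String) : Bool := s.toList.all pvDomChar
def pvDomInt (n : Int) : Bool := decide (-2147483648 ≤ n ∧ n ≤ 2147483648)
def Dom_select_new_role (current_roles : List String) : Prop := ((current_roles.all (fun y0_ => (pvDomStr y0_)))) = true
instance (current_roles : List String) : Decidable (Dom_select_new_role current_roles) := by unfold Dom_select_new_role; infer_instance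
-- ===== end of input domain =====

set_option maxHeartbeats 1000000


-- B inverts the driving loop: one pass over current_roles with a role→(rank, new_role) table, keeping the smallest-ranked hit; same results, alternative decomposition.

-- ===== PORT A =====
def pvA_new_role_mapping : PySem.Dict String String :=
  PySem.Dict.ofList [("userAdmin", "MSSP_PORTAL_ADMIN"),
                     ("basicUser", "MSSP_PORTAL_USER"),
                     ("dashboardUser", "MSSP_PORTAL_VIEWER"),
                     ("userViewer", "MSSP_PORTAL_VIEWER")]

def pvA_role_priority : List String := ["userAdmin", "basicUser", "dashboardUser", "userViewer"]

-- the `for role in role_priority: if role in current_roles: return mapping[role]` loop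
def pvA_loop (current_roles : List String) : List String → Option String
  | [] => none
  | role :: rest =>
      if role ∈ current_roles then PySem.Dict.get? pvA_new_role_mapping role
      else pvA_loop current_roles rest

def select_new_role (current_roles : List String) : Option String :=
  pvA_loop current_roles pvA_role_priority

-- ===== PORT B =====
def pvB_table : PySem.Dict String (Int × String) :=
  PySem.Dict.ofList [("userAdmin", (0, "MSSP_PORTAL_ADMIN")),
                     ("basicUser", (1, "MSSP_PORTAL_USER")),
                     ("dashboardUser", (2, "MSSP_PORTAL_VIEWER")),
                     ("userViewer", (3, "MSSP_PORTAL_VIEWER"))]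

def pvB_step (best : Option (Int × String)) (r : String) : Option (Int × String) :=
  match PySem.Dict.get? pvB_table r with
  | none => best
  | some hit =>
      match best with
      | none => some hit
      | some b => if hit.1 < b.1 then some hit else best

def select_new_role_alt (current_roles : List String) : Option String :=
  match current_roles.foldl pvB_step none with
  | some b => some b.2
  | none => none

-- ===== PRECONDITION & SPEC =====
def Spec_select_new_role (current_roles : List String) (out : Option String) : Prop := out = select_new_role_alt current_roles
instance (current_roles : List String) (out : Option String) : Decidable (Spec_select_new_role current_roles out) := by unfold Spec_select_new_role; infer_instance

-- ===== CLAIM (what is proved, stated in full; the proofs are below) =====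
def Claim_equal_select_new_role : Prop := ∀ (current_roles : List String), Dom_select_new_role current_roles → Spec_select_new_role current_roles (select_new_role current_roles)

-- ===== LEMMAS AND PROOFS =====

-- literal-table lookup facts
theorem pvA_get_admin : PySem.Dict.get? pvA_new_role_mapping "userAdmin" = some "MSSP_PORTAL_ADMIN" := by decide
theorem pvA_get_basic : PySem.Dict.get? pvA_new_role_mapping "basicUser" = some "MSSP_PORTAL_USER" := by decide
theorem pvA_get_dash : PySem.Dict.get? pvA_new_role_mapping "dashboardUser" = some "MSSP_PORTAL_VIEWER" := by decide
theorem pvA_get_view : PySem.Dict.get? pvA_new_role_mapping "userViewer" = some "MSSP_PORTAL_VIEWER" := by decide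
theorem pvB_get_admin : PySem.Dict.get? pvB_table "userAdmin" = some ((0:Int), "MSSP_PORTAL_ADMIN") := by decide
theorem pvB_get_basic : PySem.Dict.get? pvB_table "basicUser" = some ((1:Int), "MSSP_PORTAL_USER") := by decide
theorem pvB_get_dash : PySem.Dict.get? pvB_table "dashboardUser" = some ((2:Int), "MSSP_PORTAL_VIEWER") := by decide
theorem pvB_get_view : PySem.Dict.get? pvB_table "userViewer" = some ((3:Int), "MSSP_PORTAL_VIEWER") := by decide
theorem pvB_get_none (x : String) (h0 : x ≠ "userAdmin") (h1 : x ≠ "basicUser")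
    (h2 : x ≠ "dashboardUser") (h3 : x ≠ "userViewer") : PySem.Dict.get? pvB_table x = none := by
  have h : pvB_table = PySem.Dict.mk [("userAdmin", ((0:Int), "MSSP_PORTAL_ADMIN")),
      ("basicUser", ((1:Int), "MSSP_PORTAL_USER")),
      ("dashboardUser", ((2:Int), "MSSP_PORTAL_VIEWER")),
      ("userViewer", ((3:Int), "MSSP_PORTAL_VIEWER"))] := by decide
  rw [h]
  simp [PySem.Dict.get?, Ne.symm h0, Ne.symm h1, Ne.symm h2, Ne.symm h3]

-- characterisation of B's fold from accumulator s: the table entry of the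
-- highest-priority role present, if its rank beats s's rank
theorem pvB_fold_char_gen (l : List String) (s : Option (Int × String)) :
    l.foldl pvB_step s =
      (match s with
       | none =>
          (if "userAdmin" ∈ l then some ((0 : Int), "MSSP_PORTAL_ADMIN")
           else if "basicUser" ∈ l then some ((1 : Int), "MSSP_PORTAL_USER")
           else if "dashboardUser" ∈ l then some ((2 : Int), "MSSP_PORTAL_VIEWER")
           else if "userViewer" ∈ l then some ((3 : Int), "MSSP_PORTAL_VIEWER")
           else none)
       | some b =>
          (if "userAdmin" ∈ l ∧ (0:Int) < b.1 then some ((0 : Int), "MSSP_PORTAL_ADMIN")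
           else if "basicUser" ∈ l ∧ (1:Int) < b.1 then some ((1 : Int), "MSSP_PORTAL_USER")
           else if "dashboardUser" ∈ l ∧ (2:Int) < b.1 then some ((2 : Int), "MSSP_PORTAL_VIEWER")
           else if "userViewer" ∈ l ∧ (3:Int) < b.1 then some ((3 : Int), "MSSP_PORTAL_VIEWER")
           else some b)) := by
  induction l generalizing s with
  | nil => rcases s with _ | ⟨rk, v⟩ <;> simp
  | cons x xs ih =>
    by_cases hx0 : x = "userAdmin"
    · subst hx0
      rcases s with _ | ⟨rk, v⟩ <;>
        rw [List.foldl_cons] <;> simp only [pvB_step, pvB_get_admin] <;> rw [ih] <;> clear ih <;>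
        split_ifs <;> simp_all <;> (try split_ifs) <;> (try simp_all) <;> omega
    · by_cases hx1 : x = "basicUser"
      · subst hx1
        rcases s with _ | ⟨rk, v⟩ <;>
          rw [List.foldl_cons] <;> simp only [pvB_step, pvB_get_basic] <;> rw [ih] <;> clear ih <;>
          split_ifs <;> simp_all <;> (try split_ifs) <;> (try simp_all) <;> omega
      · by_cases hx2 : x = "dashboardUser"
        · subst hx2
          rcases s with _ | ⟨rk, v⟩ <;>
            rw [List.foldl_cons] <;> simp only [pvB_step, pvB_get_dash] <;> rw [ih] <;> clear ih <;>
            split_ifs <;> simp_all <;> (try split_ifs) <;> (try simp_all) <;> omega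
        · by_cases hx3 : x = "userViewer"
          · subst hx3
            rcases s with _ | ⟨rk, v⟩ <;>
              rw [List.foldl_cons] <;> simp only [pvB_step, pvB_get_view] <;> rw [ih] <;> clear ih <;>
              split_ifs <;> simp_all <;> (try split_ifs) <;> (try simp_all) <;> omega
          · have hget := pvB_get_none x hx0 hx1 hx2 hx3
            rcases s with _ | ⟨rk, v⟩ <;>
              simp [List.foldl_cons, pvB_step, hget, ih,
                    Ne.symm hx0, Ne.symm hx1, Ne.symm hx2, Ne.symm hx3]

-- ===== VERDICT (by name: the statement is the Claim_ definition above) =====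
theorem select_new_role_spec : Claim_equal_select_new_role := by
  intro l _
  unfold Spec_select_new_role select_new_role select_new_role_alt
  rw [pvB_fold_char_gen]
  by_cases h0 : "userAdmin" ∈ l <;>
  by_cases h1 : "basicUser" ∈ l <;>
  by_cases h2 : "dashboardUser" ∈ l <;>
  by_cases h3 : "userViewer" ∈ l <;>
  simp [pvA_loop, pvA_role_priority, h0, h1, h2, h3, pvA_get_admin, pvA_get_basic, pvA_get_dash, pvA_get_view]
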